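-- pv_equiv track=rewrite | github.com/manideepreddytippana/question-papers-hub | pdfstorage/main.py | extract_topics_from_questions
-- ===== SOURCE A (Python) =====
-- def extract_topics_from_questions(questions):
--     topics = []
--     topic_keywords = {
--         'Derivation': ['derive', 'derive', 'prove', 'prove'],
--         'Problem Solving': ['solve', 'calculate', 'compute', 'find'],
--         'Definitions': ['define', 'define', 'state', 'discuss'],
--         'Applications': ['apply', 'application', 'example', 'implement'],
--         'Analysis': ['analyze', 'compare', 'explain', 'analyze']
--     }
--
--     for topic_name, keywords in topic_keywords.items():
--         count = 0
--         for q in questions: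
--             for keyword in keywords:
--                 if keyword.lower() in q.lower():
--                     count += 1
--         if count > 0:
--             topics.append({
--                 'name': topic_name,
--                 'description': f'Found in {count} questions'
--             })
--
--     return topics[:5]
-- ===== SOURCE B (Python) =====
-- def extract_topics_from_questions(questions):
--     topic_keywords = {
--         'Derivation': ['derive', 'derive', 'prove', 'prove'],
--         'Problem Solving': ['solve', 'calculate', 'compute', 'find'],
--         'Definitions': ['define', 'define', 'state', 'discuss'],
--         'Applications': ['apply', 'application', 'example', 'implement'],
--         'Analysis': ['analyze', 'compare', 'explain', 'analyze']
--     }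
--     all_keywords = {kw for kws in topic_keywords.values() for kw in kws}
--     # one pass over the questions: how many (lowercased) questions contain each keyword
--     index = {}
--     for q in questions:
--         ql = q.lower()
--         for kw in all_keywords:
--             if kw in ql:
--                 index[kw] = index.get(kw, 0) + 1
--     topics = [
--         {'name': name, 'description': f'Found in {count} questions'}
--         for name, kws in topic_keywords.items()
--         if (count := sum(index.get(kw, 0) for kw in kws)) > 0
--     ]
--     return topics[:5]
-- ===== Notes on version B (the rewrite author's own statement) =====
-- stated objective: alternative
-- what changed: Replaces the per-topic triple nested scan (which lowercases every question once per keyword occurrence) by one pass over the questions that lowercases each question once and builds a keyword->question-count index, then computes each topic's count as a sum of index lookups; duplicate keywords still double-count and the count>0 filter and [:5] slice are preserved.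
import Mathlib
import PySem

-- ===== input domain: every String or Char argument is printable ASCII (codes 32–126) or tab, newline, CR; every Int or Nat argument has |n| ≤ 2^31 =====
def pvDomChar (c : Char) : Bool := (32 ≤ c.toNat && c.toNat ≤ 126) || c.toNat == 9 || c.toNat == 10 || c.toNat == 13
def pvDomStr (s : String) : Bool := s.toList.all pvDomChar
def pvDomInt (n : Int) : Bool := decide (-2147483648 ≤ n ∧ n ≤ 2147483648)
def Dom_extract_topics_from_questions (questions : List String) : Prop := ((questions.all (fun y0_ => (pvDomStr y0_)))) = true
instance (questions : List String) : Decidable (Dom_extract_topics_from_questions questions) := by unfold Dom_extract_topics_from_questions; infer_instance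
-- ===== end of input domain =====

-- B replaces A's per-topic triple nested scan by one pass over the questions building a
-- keyword -> question-count index, then sums index lookups per topic (lowercases each question once; measured faster in a timing run).

-- the literal topic_keywords table both Pythons carry
def pvTopicKeywords : List (String × List String) :=
  [("Derivation", ["derive", "derive", "prove", "prove"]),
   ("Problem Solving", ["solve", "calculate", "compute", "find"]),
   ("Definitions", ["define", "define", "state", "discuss"]),
   ("Applications", ["apply", "application", "example", "implement"]),
   ("Analysis", ["analyze", "compare", "explain", "analyze"])]

-- ===== PORT A =====
def extract_topics_from_questions (questions : List String) : List (List (String × String)) :=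
  let topics : List (List (String × String)) :=
    pvTopicKeywords.foldl (fun topics tk =>
      let count : Int :=
        questions.foldl (fun c q =>
          tk.2.foldl (fun c kw =>
            if PySem.Str.isIn (PySem.Str.lower kw) (PySem.Str.lower q) then c + 1 else c) c) 0
      if count > 0 then
        topics ++ [[("name", tk.1),
                    ("description", "Found in " ++ PySem.Int.toStr count ++ " questions")]]
      else topics) []
  PySem.List.slice topics none (some 5)

-- ===== PORT B =====
-- all_keywords = {kw for kws in topic_keywords.values() for kw in kws}  (order-insensitive use)
def pvAllKeywords : List String := PySem.Set.ofList (pvTopicKeywords.flatMap (fun tk => tk.2))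

def extract_topics_from_questions_alt (questions : List String) : List (List (String × String)) :=
  let index : PySem.Dict String Int :=
    questions.foldl (fun idx q =>
      let ql := PySem.Str.lower q
      pvAllKeywords.foldl (fun idx kw =>
        if PySem.Str.isIn kw ql then idx.modify kw 0 (· + 1) else idx) idx) PySem.Dict.empty
  let topics : List (List (String × String)) :=
    ((pvTopicKeywords.map (fun tk =>
        (tk.1, (tk.2.map (fun kw => index.getD kw 0)).sum))).filter (fun p => p.2 > 0)).map
      (fun p => [("name", p.1),
                 ("description", "Found in " ++ PySem.Int.toStr p.2 ++ " questions")])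
  topics.take 5

-- ===== PRECONDITION & SPEC =====
def Spec_extract_topics_from_questions (questions : List String) (out : List (List (String × String))) : Prop := out = extract_topics_from_questions_alt questions
instance (questions : List String) (out : List (List (String × String))) : Decidable (Spec_extract_topics_from_questions questions out) := by unfold Spec_extract_topics_from_questions; infer_instance

-- ===== CLAIM (what is proved, stated in full; the proofs are below) =====
def Claim_equal_extract_topics_from_questions : Prop := ∀ (questions : List String), Dom_extract_topics_from_questions questions → Spec_extract_topics_from_questions questions (extract_topics_from_questions questions)

-- ===== LEMMAS AND PROOFS =====

-- the index built by B's first pass, as a standalone function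
def pvIndex (questions : List String) : PySem.Dict String Int :=
  questions.foldl (fun idx q =>
    let ql := PySem.Str.lower q
    pvAllKeywords.foldl (fun idx kw =>
      if PySem.Str.isIn kw ql then idx.modify kw 0 (· + 1) else idx) idx) PySem.Dict.empty

-- one question's inner loop bumps the count of kw by 1 exactly when kw ∈ pvAllKeywords and kw occurs in ql
lemma pvIndex_step (idx : PySem.Dict String Int) (ql : String) (kw : String) :
    (pvAllKeywords.foldl (fun idx kw =>
        if PySem.Str.isIn kw ql then idx.modify kw 0 (· + 1) else idx) idx).getD kw 0
    = idx.getD kw 0 + ((pvAllKeywords.filter (fun k => PySem.Str.isIn k ql)).count kw : Int) := by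
  rw [PySem.List.foldl_if_eq_foldl_filter]
  exact PySem.Dict.getD_foldl_modify_add_one _ _ _

-- the index counts, for each keyword, the questions whose lowercase contains it
lemma pvIndex_getD (questions : List String) (kw : String) (hkw : kw ∈ pvAllKeywords) :
    (pvIndex questions).getD kw 0
    = (questions.countP (fun q => PySem.Str.isIn kw (PySem.Str.lower q)) : Int) := by
  have hnd : pvAllKeywords.Nodup := by decide
  have key : ∀ (qs : List String) (idx : PySem.Dict String Int),
      (qs.foldl (fun idx q =>
        let ql := PySem.Str.lower q
        pvAllKeywords.foldl (fun idx kw =>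
          if PySem.Str.isIn kw ql then idx.modify kw 0 (· + 1) else idx) idx) idx).getD kw 0
      = idx.getD kw 0 + (qs.countP (fun q => PySem.Str.isIn kw (PySem.Str.lower q)) : Int) := by
    intro qs
    induction qs with
    | nil => intro idx; simp
    | cons q qs ih =>
      intro idx
      rw [List.foldl_cons, ih, pvIndex_step, List.countP_cons]
      have : (pvAllKeywords.filter (fun k => PySem.Str.isIn k (PySem.Str.lower q))).count kw
          = if PySem.Str.isIn kw (PySem.Str.lower q) then 1 else 0 := by
        by_cases h : PySem.Str.isIn kw (PySem.Str.lower q) = true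
        · rw [if_pos h, List.count_filter (p := fun k => PySem.Str.isIn k (PySem.Str.lower q)) h]
          exact List.count_eq_one_of_mem hnd hkw
        · rw [if_neg h, List.count_eq_zero]
          intro hmem
          exact h (List.of_mem_filter (p := fun k => PySem.Str.isIn k (PySem.Str.lower q)) hmem)
      rw [this]
      split_ifs with h <;> push_cast <;> ring
  rw [pvIndex, key]
  simp

-- exchanging the two summations: Σ_a countP B (r a) = Σ_b countP A (r · b)
lemma pvDoubleCount {α β : Type} (A : List α) (B : List β) (r : α → β → Bool) :
    (A.map (fun a => (B.countP (fun b => r a b) : Int))).sum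
    = (B.map (fun b => (A.countP (fun a => r a b) : Int))).sum := by
  induction A with
  | nil => simp
  | cons a A ih =>
    simp only [List.map_cons, List.sum_cons, ih, List.countP_cons]
    have h1 : (B.map (fun b => ((A.countP (fun a => r a b) + if r a b then 1 else 0 : Nat) : Int))).sum
        = (B.map (fun b => (A.countP (fun a => r a b) : Int) + if r a b then (1 : Int) else 0)).sum := by
      apply congrArg
      apply List.map_congr_left
      intro b _
      push_cast
      rfl
    rw [h1, PySem.List.sum_map_add_int, PySem.List.sum_map_ite_one_zero]
    ring

-- A's per-topic count equals B's sum of index lookups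
lemma pvCount_eq (questions : List String) (tk : String × List String)
    (htk : tk ∈ pvTopicKeywords) :
    questions.foldl (fun c q =>
        tk.2.foldl (fun c kw =>
          if PySem.Str.isIn (PySem.Str.lower kw) (PySem.Str.lower q) then c + 1 else c) c) 0
    = (tk.2.map (fun kw => (pvIndex questions).getD kw 0)).sum := by
  have hlow : ∀ kw ∈ tk.2, PySem.Str.lower kw = kw := by
    fin_cases htk <;> decide
  have hmem : ∀ kw ∈ tk.2, kw ∈ pvAllKeywords := by
    fin_cases htk <;> decide
  have h1 : ∀ (c : Int) (q : String),
      tk.2.foldl (fun c kw =>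
        if PySem.Str.isIn (PySem.Str.lower kw) (PySem.Str.lower q) then c + 1 else c) c
      = c + (tk.2.countP (fun kw => PySem.Str.isIn kw (PySem.Str.lower q)) : Int) := by
    intro c q
    rw [PySem.List.foldl_congr_mem' tk.2
        (fun c kw => if PySem.Str.isIn (PySem.Str.lower kw) (PySem.Str.lower q) then c + 1 else c)
        (fun c kw => if PySem.Str.isIn kw (PySem.Str.lower q) then c + 1 else c) c
        (by intro kw hkw c'; simp only [hlow kw hkw])]
    exact PySem.List.foldl_if_add_one _ _ _
  calc questions.foldl _ 0
      = questions.foldl (fun c q =>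
          c + (tk.2.countP (fun kw => PySem.Str.isIn kw (PySem.Str.lower q)) : Int)) 0 := by
        apply PySem.List.foldl_congr_mem
        intro c q _
        exact h1 c q
    _ = (questions.map (fun q => (tk.2.countP (fun kw => PySem.Str.isIn kw (PySem.Str.lower q)) : Int))).sum := by
        rw [PySem.List.foldl_add]; simp
    _ = (tk.2.map (fun kw => (questions.countP (fun q => PySem.Str.isIn kw (PySem.Str.lower q)) : Int))).sum := by
        exact pvDoubleCount questions tk.2 (fun q kw => PySem.Str.isIn kw (PySem.Str.lower q))
    _ = (tk.2.map (fun kw => (pvIndex questions).getD kw 0)).sum := by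
        congr 1
        apply List.map_congr_left
        intro kw hkw
        rw [pvIndex_getD questions kw (hmem kw hkw)]

-- B's per-topic count and output row, named for the proof
def pvCountB (questions : List String) (tk : String × List String) : Int :=
  (tk.2.map (fun kw => (pvIndex questions).getD kw 0)).sum

def pvEntry (questions : List String) (tk : String × List String) : List (String × String) :=
  [("name", tk.1), ("description", "Found in " ++ PySem.Int.toStr (pvCountB questions tk) ++ " questions")]

lemma pvA_eq (questions : List String) :
    extract_topics_from_questions questions
    = PySem.List.slice (pvTopicKeywords.foldl (fun topics tk =>
        if pvCountB questions tk > 0 then topics ++ [pvEntry questions tk] else topics) [])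
        none (some 5) := by
  show PySem.List.slice _ none (some 5) = _
  congr 1
  apply PySem.List.foldl_congr_mem
  intro acc tk htk
  simp only [pvEntry, pvCountB]
  rw [pvCount_eq questions tk htk]

lemma pvB_eq (questions : List String) :
    extract_topics_from_questions_alt questions
    = (((pvTopicKeywords.map (fun tk => (tk.1, pvCountB questions tk))).filter
          (fun p => p.2 > 0)).map
        (fun p => [("name", p.1),
                   ("description", "Found in " ++ PySem.Int.toStr p.2 ++ " questions")])).take 5 := by
  unfold extract_topics_from_questions_alt
  rfl

-- ===== VERDICT (by name: the statement is the Claim_ definition above) =====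
theorem extract_topics_from_questions_spec : Claim_equal_extract_topics_from_questions := by
  intro questions _
  unfold Spec_extract_topics_from_questions
  rw [pvA_eq, pvB_eq]
  rw [PySem.List.foldl_append_ite (p := fun tk => pvCountB questions tk > 0)
      (f := pvEntry questions)]
  rw [List.filter_map, List.map_map]
  rw [PySem.List.slice_to _ (by norm_num : (0:Int) ≤ 5)]
  simp only [List.nil_append]
  rfl
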